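-- pv_equiv track=rewrite | github.com/AmolJadhav37/R-tree_sequence | rtree_animation.py | exhaustive_split
-- ===== SOURCE A (Python) =====
-- import math
--
-- def mbr(rects):
--     r=list(rects)
--     return (min(x[0] for x in r),min(x[1] for x in r),
--             max(x[2] for x in r),max(x[3] for x in r))
--
-- def overlap_area(a,b):
--     ox=max(0,min(a[2],b[2])-max(a[0],b[0]))
--     oy=max(0,min(a[3],b[3])-max(a[1],b[1]))
--     return ox*oy
--
-- def perimeter(r): return 2*((r[2]-r[0])+(r[3]-r[1]))
--
-- def exhaustive_split(entries, m, M):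
--     best_ov, best_pe = math.inf, math.inf
--     best_g1, best_g2 = None, None
--     for axis in range(2):
--         for sort_upper in range(2):
--             key_fn = (lambda e, a=axis, u=sort_upper: e[1][a + 2*u])
--             se = sorted(entries, key=key_fn)
--             n  = len(se)
--             for k in range(m, n-m+1):
--                 g1, g2 = se[:k], se[k:]
--                 m1 = mbr([e[1] for e in g1])
--                 m2 = mbr([e[1] for e in g2])
--                 ov = overlap_area(m1, m2)
--                 pp = perimeter(m1)+perimeter(m2)
--                 if ov < best_ov or (ov == best_ov and pp < best_pe):
--                     best_ov, best_pe = ov, pp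
--                     best_g1, best_g2 = g1, g2
--     return best_g1, best_g2
-- ===== SOURCE B (Python) =====
-- def exhaustive_split(entries, m, M):
--     # Precompute prefix/suffix MBRs per sort order: O(n log n) instead of O(n^2) per axis.
--     best = None  # (ov, pp, se, k)
--     n = len(entries)
--     for key in (lambda e: e[1][0], lambda e: e[1][2],
--                 lambda e: e[1][1], lambda e: e[1][3]):
--         se = sorted(entries, key=key)
--         rects = [e[1] for e in se]
--         # pref[i] = MBR of rects[:i+1]
--         pref = []
--         cur = None
--         for r in rects:
--             cur = r if cur is None else (min(cur[0], r[0]), min(cur[1], r[1]),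
--                                          max(cur[2], r[2]), max(cur[3], r[3]))
--             pref.append(cur)
--         # suf[i] = MBR of rects[i:]
--         suf = []
--         cur = None
--         for r in reversed(rects):
--             cur = r if cur is None else (min(r[0], cur[0]), min(r[1], cur[1]),
--                                          max(r[2], cur[2]), max(r[3], cur[3]))
--             suf.append(cur)
--         suf.reverse()
--         for k in range(m, n - m + 1):
--             m1, m2 = pref[k - 1], suf[k]
--             ox = max(0, min(m1[2], m2[2]) - max(m1[0], m2[0]))
--             oy = max(0, min(m1[3], m2[3]) - max(m1[1], m2[1]))
--             ov = ox * oy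
--             pp = 2 * ((m1[2] - m1[0]) + (m1[3] - m1[1])) + 2 * ((m2[2] - m2[0]) + (m2[3] - m2[1]))
--             if best is None or (ov, pp) < (best[0], best[1]):
--                 best = (ov, pp, se, k)
--     if best is None:
--         return None, None
--     _, _, se, k = best
--     return se[:k], se[k:]
-- ===== Notes on version B (the rewrite author's own statement) =====
-- stated objective: faster
-- what changed: B precomputes prefix and suffix MBR arrays once per sort order so each split point costs O(1) instead of an O(n) rescan, and stores only the best split index, slicing the groups once at the end.
import Mathlib
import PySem

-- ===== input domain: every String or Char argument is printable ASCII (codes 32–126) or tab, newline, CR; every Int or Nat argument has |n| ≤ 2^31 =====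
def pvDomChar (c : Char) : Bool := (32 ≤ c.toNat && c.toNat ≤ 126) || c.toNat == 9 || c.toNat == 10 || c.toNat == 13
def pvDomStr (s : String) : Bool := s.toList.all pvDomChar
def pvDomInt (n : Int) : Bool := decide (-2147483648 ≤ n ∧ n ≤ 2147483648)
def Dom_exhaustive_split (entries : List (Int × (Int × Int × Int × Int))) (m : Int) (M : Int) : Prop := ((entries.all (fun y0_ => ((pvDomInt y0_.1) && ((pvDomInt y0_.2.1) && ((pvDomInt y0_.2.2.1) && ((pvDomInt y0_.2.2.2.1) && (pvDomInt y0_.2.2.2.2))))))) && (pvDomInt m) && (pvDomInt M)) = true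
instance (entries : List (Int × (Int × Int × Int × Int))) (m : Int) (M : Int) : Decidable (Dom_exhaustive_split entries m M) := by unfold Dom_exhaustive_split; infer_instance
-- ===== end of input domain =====

-- B replaces A's per-split O(n) MBR scans by prefix/suffix MBR arrays built once per sort
-- order (objective: faster, O(n^2) → O(n log n)); return values agree for m ≥ 1 (A raises below).

abbrev PvRect := Int × Int × Int × Int
abbrev PvEntry := Int × PvRect

-- ===== PORT A =====
-- mbr(rects): min/max folds per coordinate; Python raises ValueError on [], which Pre_ excludes.
def pvMbr : List PvRect → PvRect
  | [] => (0, 0, 0, 0)   -- unreachable under Pre_ (Python: ValueError)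
  | r :: rt => (rt.foldl (fun a x => min a x.1) r.1,
                rt.foldl (fun a x => min a x.2.1) r.2.1,
                rt.foldl (fun a x => max a x.2.2.1) r.2.2.1,
                rt.foldl (fun a x => max a x.2.2.2) r.2.2.2)

def pvOverlap (a b : PvRect) : Int :=
  (max 0 (min a.2.2.1 b.2.2.1 - max a.1 b.1)) * (max 0 (min a.2.2.2 b.2.2.2 - max a.2.1 b.2.1))

def pvPerim (r : PvRect) : Int := 2 * ((r.2.2.1 - r.1) + (r.2.2.2 - r.2.1))

-- e[1][i] for i = axis + 2*sort_upper ∈ {0,1,2,3}: tuple indexing on the 4-tuple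
def pvCoord (r : PvRect) (i : Int) : Int :=
  if i = 0 then r.1 else if i = 1 then r.2.1 else if i = 2 then r.2.2.1 else r.2.2.2

-- loop state: (best_ov, best_pe) — none = (inf, inf) — and best_g1, best_g2
abbrev PvStA := Option (Int × Int) × Option (List PvEntry) × Option (List PvEntry)

def pvStepA (se : List PvEntry) (st : PvStA) (k : Int) : PvStA :=
  let g1 := PySem.List.slice se none (some k)
  let g2 := PySem.List.slice se (some k) none
  let m1 := pvMbr (g1.map (·.2))
  let m2 := pvMbr (g2.map (·.2))
  let ov := pvOverlap m1 m2
  let pp := pvPerim m1 + pvPerim m2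
  match st.1 with
  | none => (some (ov, pp), some g1, some g2)          -- ov < inf
  | some (bov, bpe) =>
      if ov < bov ∨ (ov = bov ∧ pp < bpe) then (some (ov, pp), some g1, some g2) else st

def pvRunKeyA (entries : List PvEntry) (m : Int) (st : PvStA) (idx : Int) : PvStA :=
  let se := PySem.List.sorted entries (fun e => pvCoord e.2 idx) false
  let n : Int := se.length
  (PySem.List.pyRange m (n - m + 1) 1).foldl (pvStepA se) st

def exhaustive_split (entries : List (Int × (Int × Int × Int × Int))) (m : Int) (M : Int) : (Option (List (Int × (Int × Int × Int × Int)))) × (Option (List (Int × (Int × Int × Int × Int)))) :=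
  let st := (PySem.List.pyRange 0 2 1).foldl
    (fun st axis => (PySem.List.pyRange 0 2 1).foldl
      (fun st u => pvRunKeyA entries m st (axis + 2 * u)) st)
    ((none, none, none) : PvStA)
  (st.2.1, st.2.2)

-- ===== PORT B =====
def pvUnion (a b : PvRect) : PvRect :=
  (min a.1 b.1, min a.2.1 b.2.1, max a.2.2.1 b.2.2.1, max a.2.2.2 b.2.2.2)

-- the running-accumulator loop shared by Source B's two scans (op = how cur absorbs the next rect)
def pvScanGo (op : PvRect → PvRect → PvRect) (cur : PvRect) : List PvRect → List PvRect
  | [] => []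
  | r :: rt => (op cur r) :: pvScanGo op (op cur r) rt

-- pref[i] = MBR of rects[:i+1]
def pvPref : List PvRect → List PvRect
  | [] => []
  | r :: rt => r :: pvScanGo pvUnion r rt

-- suf[i] = MBR of rects[i:]  (Source B: accumulate over reversed(rects), then reverse)
def pvSuf (rects : List PvRect) : List PvRect :=
  match rects.reverse with
  | [] => []
  | r :: rt => (r :: pvScanGo (fun c x => pvUnion x c) r rt).reverse

-- best = none | some (ov, pp, se, k)
abbrev PvStB := Option (Int × Int × List PvEntry × Int)

def pvStepB (se : List PvEntry) (pref suf : List PvRect) (st : PvStB) (k : Int) : PvStB :=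
  let m1 := PySem.List.pyGetD pref (k - 1) (0, 0, 0, 0)   -- index in range for every k the loop visits
  let m2 := PySem.List.pyGetD suf k (0, 0, 0, 0)
  let ov := (max 0 (min m1.2.2.1 m2.2.2.1 - max m1.1 m2.1)) *
            (max 0 (min m1.2.2.2 m2.2.2.2 - max m1.2.1 m2.2.1))
  let pp := 2 * ((m1.2.2.1 - m1.1) + (m1.2.2.2 - m1.2.1)) +
            2 * ((m2.2.2.1 - m2.1) + (m2.2.2.2 - m2.2.1))
  match st with
  | none => some (ov, pp, se, k)
  | some (bov, bpe, _, _) =>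
      if ov < bov ∨ (ov = bov ∧ pp < bpe) then some (ov, pp, se, k) else st

def pvRunKeyB (entries : List PvEntry) (m : Int) (st : PvStB) (key : PvEntry → Int) : PvStB :=
  let se := PySem.List.sorted entries key false
  let rects := se.map (·.2)
  let pref := pvPref rects
  let suf := pvSuf rects
  let n : Int := entries.length
  (PySem.List.pyRange m (n - m + 1) 1).foldl (pvStepB se pref suf) st

def exhaustive_split_alt (entries : List (Int × (Int × Int × Int × Int))) (m : Int) (M : Int) : (Option (List (Int × (Int × Int × Int × Int)))) × (Option (List (Int × (Int × Int × Int × Int)))) :=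
  let st := ([fun (e : PvEntry) => e.2.1, fun e => e.2.2.2.1,
              fun e => e.2.2.1, fun e => e.2.2.2.2] : List (PvEntry → Int)).foldl
    (pvRunKeyB entries m) none
  match st with
  | none => (none, none)
  | some (_, _, se, k) =>
      (some (PySem.List.slice se none (some k)), some (PySem.List.slice se (some k) none))

-- ===== PRECONDITION & SPEC =====
-- Pre_ excludes m ≤ 0, on which A always raises ValueError (mbr of an empty group at k = 0).
def Pre_exhaustive_split (entries : List (Int × (Int × Int × Int × Int))) (m : Int) (M : Int) : Prop := 1 ≤ m
instance (entries : List (Int × (Int × Int × Int × Int))) (m : Int) (M : Int) : Decidable (Pre_exhaustive_split entries m M) := by unfold Pre_exhaustive_split; infer_instance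
def pvWitness_exhaustive_split : (List (Int × (Int × Int × Int × Int))) × Int × Int :=
  ([(0, (0, 0, 1, 1)), (1, (2, 2, 3, 3))], 1, 2)
def Spec_exhaustive_split (entries : List (Int × (Int × Int × Int × Int))) (m : Int) (M : Int) (out : (Option (List (Int × (Int × Int × Int × Int)))) × (Option (List (Int × (Int × Int × Int × Int))))) : Prop := out = exhaustive_split_alt entries m M
instance (entries : List (Int × (Int × Int × Int × Int))) (m : Int) (M : Int) (out : (Option (List (Int × (Int × Int × Int × Int)))) × (Option (List (Int × (Int × Int × Int × Int))))) : Decidable (Spec_exhaustive_split entries m M out) := by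
  unfold Spec_exhaustive_split
  have h : DecidableEq (List (Int × Int × Int × Int × Int)) := inferInstance
  infer_instance

-- ===== CLAIM (what is proved, stated in full; the proofs are below) =====
def Claim_equal_exhaustive_split : Prop := ∀ (entries : List (Int × (Int × Int × Int × Int))) (m : Int) (M : Int), Dom_exhaustive_split entries m M → Pre_exhaustive_split entries m M → Spec_exhaustive_split entries m M (exhaustive_split entries m M)

-- ===== LEMMAS AND PROOFS =====

theorem pvUnion_assoc (a b c : PvRect) : pvUnion (pvUnion a b) c = pvUnion a (pvUnion b c) := by
  simp [pvUnion, min_assoc, max_assoc]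

-- A's per-coordinate min/max folds compute the fold of pairwise unions
theorem pvMbr_cons (a : PvRect) (xs : List PvRect) :
    pvMbr (a :: xs) = xs.foldl pvUnion a := by
  induction xs generalizing a with
  | nil => rfl
  | cons x xt ih =>
      simp only [List.foldl_cons]
      rw [← ih (pvUnion a x)]
      rfl

theorem pvPref_eq (x : PvRect) (xt : List PvRect) :
    pvPref (x :: xt) =
      (List.range (xt.length + 1)).map (fun i => pvMbr ((x :: xt).take (i + 1))) := by
  suffices h : ∀ (xt : List PvRect) (x : PvRect),
      x :: pvScanGo pvUnion x xt =
        (List.range (xt.length + 1)).map (fun i => pvMbr ((x :: xt).take (i + 1))) by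
    simpa [pvPref] using h xt x
  intro xt
  induction xt with
  | nil => intro x; simp [pvScanGo, pvMbr]
  | cons y yt ih =>
      intro x
      rw [List.range_succ_eq_map]
      simp only [List.map_cons, List.map_map]
      have h0 : pvMbr ((x :: y :: yt).take (0 + 1)) = x := by simp [pvMbr]
      rw [show pvScanGo pvUnion x (y :: yt) = pvUnion x y :: pvScanGo pvUnion (pvUnion x y) yt from rfl]
      rw [h0]
      congr 1
      rw [ih (pvUnion x y)]
      apply List.map_congr_left
      intro i _
      simp [List.take_succ_cons, pvMbr_cons]

theorem pvMbr_append_pair (zs : List PvRect) (y r : PvRect) :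
    pvMbr (zs ++ [y, r]) = pvMbr (zs ++ [pvUnion y r]) := by
  cases zs with
  | nil => simp [pvMbr_cons, List.foldl]
  | cons z zt =>
      simp only [List.cons_append, pvMbr_cons, List.foldl_append, List.foldl_cons, List.foldl_nil]
      exact pvUnion_assoc _ _ _

theorem pvSuf_eq (rects : List PvRect) (hne : rects ≠ []) :
    pvSuf rects = (List.range rects.length).map (fun i => pvMbr (rects.drop i)) := by
  suffices h : ∀ (rt : List PvRect) (r : PvRect),
      ((r :: pvScanGo (fun c x => pvUnion x c) r rt)).reverse =
        (List.range (rt.length + 1)).map (fun i => pvMbr ((rt.reverse ++ [r]).drop i)) by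
    obtain ⟨r, rt, hrev⟩ : ∃ r rt, rects.reverse = r :: rt := by
      cases hr : rects.reverse with
      | nil => exact absurd (by simpa using congrArg List.reverse hr) hne
      | cons a b => exact ⟨a, b, rfl⟩
    have hre : rects = rt.reverse ++ [r] := by
      have := congrArg List.reverse hrev
      simpa using this
    have hlen : rects.length = rt.length + 1 := by rw [hre]; simp
    have hstep : pvSuf rects = ((r :: pvScanGo (fun c x => pvUnion x c) r rt)).reverse := by
      rw [pvSuf, hrev]
    rw [hstep, h rt r, hlen, ← hre]
  intro rt
  induction rt with
  | nil => intro r; simp [pvScanGo, pvMbr]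
  | cons y yt ih =>
      intro r
      rw [show pvScanGo (fun c x => pvUnion x c) r (y :: yt)
            = pvUnion y r :: pvScanGo (fun c x => pvUnion x c) (pvUnion y r) yt from rfl]
      rw [List.reverse_cons, ih (pvUnion y r)]
      have hlast : pvMbr (((y :: yt).reverse ++ [r]).drop ((y :: yt).length)) = r := by
        have hs : (y :: yt).reverse ++ [r] = (yt.reverse ++ [y]) ++ [r] := by simp
        rw [hs, List.length_cons]
        have hlen : (yt.reverse ++ [y]).length = yt.length + 1 := by simp
        rw [← hlen, List.drop_left]
        rfl
      conv_rhs => rw [List.range_succ, List.map_append, List.map_singleton]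
      rw [hlast]
      simp only [List.length_cons]
      congr 1
      apply List.map_congr_left
      intro i hi
      have hi' : i ≤ yt.reverse.length := by simp at hi ⊢; omega
      have h1 : ((y :: yt).reverse ++ [r]).drop i = yt.reverse.drop i ++ [y, r] := by
        rw [List.reverse_cons, List.append_assoc, List.drop_append_of_le_length hi']
        rfl
      have h2 : (yt.reverse ++ [pvUnion y r]).drop i = yt.reverse.drop i ++ [pvUnion y r] := by
        rw [List.drop_append_of_le_length hi']
      rw [h1, h2, pvMbr_append_pair]

theorem pvPref_length (rects : List PvRect) : (pvPref rects).length = rects.length := by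
  cases rects with
  | nil => rfl
  | cons x xt => rw [pvPref_eq]; simp

theorem pvSuf_length (rects : List PvRect) : (pvSuf rects).length = rects.length := by
  cases rects with
  | nil => rfl
  | cons x xt => rw [pvSuf_eq _ (by simp)]; simp

theorem pvPref_get (rects : List PvRect) (k : Nat) (hk : k < rects.length) :
    (pvPref rects)[k]? = some (pvMbr (rects.take (k + 1))) := by
  cases rects with
  | nil => simp at hk
  | cons x xt =>
      rw [pvPref_eq]
      have hk' : k < xt.length + 1 := by simpa using hk
      simp [hk']

theorem pvSuf_get (rects : List PvRect) (k : Nat) (hk : k < rects.length) :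
    (pvSuf rects)[k]? = some (pvMbr (rects.drop k)) := by
  have hne : rects ≠ [] := by intro h; simp [h] at hk
  rw [pvSuf_eq rects hne]
  simp [hk]

-- simulation: materialize B's compact state as A's state
def pvMatB : PvStB → PvStA
  | none => (none, none, none)
  | some t =>
      (some (t.1, t.2.1), some (PySem.List.slice t.2.2.1 none (some t.2.2.2)),
       some (PySem.List.slice t.2.2.1 (some t.2.2.2) none))

theorem pvStep_eq (se : List PvEntry) (stB : PvStB) (k m : Int) (hm : 1 ≤ m)
    (hk1 : m ≤ k) (hk2 : k ≤ (se.length : Int) - m) :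
    pvStepA se (pvMatB stB) k
      = pvMatB (pvStepB se (pvPref (se.map (·.2))) (pvSuf (se.map (·.2))) stB k) := by
  have hk0 : (0:Int) ≤ k := by omega
  have hkn : k.toNat ≤ se.length := by omega
  have hk1' : 1 ≤ k.toNat := by omega
  have hkltn : k.toNat < se.length := by omega
  have hg1 : PySem.List.slice se none (some k) = se.take k.toNat := PySem.List.slice_to se hk0
  have hg2 : PySem.List.slice se (some k) none = se.drop k.toNat := PySem.List.slice_from se hk0
  have hlen : (se.map (·.2)).length = se.length := by simp
  have hm1 : PySem.List.pyGetD (pvPref (se.map (·.2))) (k - 1) ((0:Int), (0:Int), (0:Int), (0:Int))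
      = pvMbr ((PySem.List.slice se none (some k)).map (·.2)) := by
    rw [hg1]
    rw [PySem.List.pyGetD_eq_getElem (pvPref (se.map (·.2))) ((0:Int), (0:Int), (0:Int), (0:Int))
        (show (0:Int) ≤ k - 1 by omega)
        (show k - 1 < ((pvPref (se.map (·.2))).length : Int) by rw [pvPref_length, hlen]; omega)]
    have := pvPref_get (se.map (·.2)) (k.toNat - 1) (by omega)
    rw [List.getElem?_eq_getElem (by rw [pvPref_length, hlen]; omega)] at this
    have heq : (k - 1).toNat = k.toNat - 1 := by omega
    simp only [heq]
    have h2 := Option.some.inj this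
    rw [h2, show k.toNat - 1 + 1 = k.toNat from by omega, List.map_take]
  have hm2 : PySem.List.pyGetD (pvSuf (se.map (·.2))) k ((0:Int), (0:Int), (0:Int), (0:Int))
      = pvMbr ((PySem.List.slice se (some k) none).map (·.2)) := by
    rw [hg2]
    rw [PySem.List.pyGetD_eq_getElem (pvSuf (se.map (·.2))) ((0:Int), (0:Int), (0:Int), (0:Int)) hk0
        (show k < ((pvSuf (se.map (·.2))).length : Int) by rw [pvSuf_length, hlen]; omega)]
    have := pvSuf_get (se.map (·.2)) k.toNat (by omega)
    rw [List.getElem?_eq_getElem (by rw [pvSuf_length, hlen]; omega)] at this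
    have h2 := Option.some.inj this
    rw [h2, List.map_drop]
  simp only [pvStepA, pvStepB, pvOverlap, pvPerim, hm1, hm2]
  cases stB with
  | none => simp only [pvMatB]
  | some t =>
      obtain ⟨ov, pp, bse, bk⟩ := t
      simp only [pvMatB]
      split_ifs with h
      · rfl
      · rfl

theorem pvFoldl_matB (se : List PvEntry) (pref suf : List PvRect)
    (ks : List Int) (stB : PvStB)
    (h : ∀ (st : PvStB) (k : Int), k ∈ ks →
        pvStepA se (pvMatB st) k = pvMatB (pvStepB se pref suf st k)) :
    ks.foldl (pvStepA se) (pvMatB stB) = pvMatB (ks.foldl (pvStepB se pref suf) stB) := by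
  induction ks generalizing stB with
  | nil => rfl
  | cons k kt ih =>
      simp only [List.foldl_cons]
      rw [h stB k (by simp)]
      exact ih _ (fun st k' hk' => h st k' (by simp [hk']))

theorem pvRunKey_eq (entries : List PvEntry) (m : Int) (hm : 1 ≤ m) (stB : PvStB)
    (idx : Int) (key : PvEntry → Int) (hkey : (fun e : PvEntry => pvCoord e.2 idx) = key) :
    pvRunKeyA entries m (pvMatB stB) idx = pvMatB (pvRunKeyB entries m stB key) := by
  unfold pvRunKeyA pvRunKeyB
  rw [hkey]
  have hlen : (PySem.List.sorted entries key false).length = entries.length :=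
    PySem.List.length_sorted entries key false
  rw [show ((entries.length : Int)) = ((PySem.List.sorted entries key false).length : Int) from by rw [hlen]]
  apply pvFoldl_matB
  intro st k hk
  rw [PySem.List.mem_pyRange_one] at hk
  exact pvStep_eq _ st k m hm hk.1 (by omega)

-- ===== VERDICT (by name: the statement is the Claim_ definition above) =====
theorem exhaustive_split_spec : Claim_equal_exhaustive_split := by
  intro entries m M _ hm
  unfold Spec_exhaustive_split exhaustive_split exhaustive_split_alt
  have h2 : PySem.List.pyRange 0 2 1 = [0, 1] := by decide
  simp only [h2, List.foldl_cons, List.foldl_nil]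
  norm_num
  rw [show ((none, none, none) : PvStA) = pvMatB none from rfl]
  rw [pvRunKey_eq entries m hm none 0 (fun e : PvEntry => e.2.1) (by funext e; simp [pvCoord]),
      pvRunKey_eq entries m hm _ 2 (fun e : PvEntry => e.2.2.2.1) (by funext e; simp [pvCoord]),
      pvRunKey_eq entries m hm _ 1 (fun e : PvEntry => e.2.2.1) (by funext e; simp [pvCoord]),
      pvRunKey_eq entries m hm _ 3 (fun e : PvEntry => e.2.2.2.2) (by funext e; simp [pvCoord])]
  rcases (pvRunKeyB entries m (pvRunKeyB entries m (pvRunKeyB entries m (pvRunKeyB entries m none _) _) _) _) with _ | ⟨ov, pp, se, k⟩ <;> rfl
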